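-- pv_equiv track=rewrite | github.com/Grady10086/Toward-Supersensing | tools/cambw/build_benchmark_version.py | render_options
-- ===== SOURCE A (Python) =====
-- from typing import Any, Dict, Iterable, List, Tuple
--
-- def render_options(permutations: List[List[str]], idx_correct: int) -> Tuple[List[str], str]:
--     letters = ["A", "B", "C", "D"]
--     if not permutations:
--         return [], "A"
--     arranged: List[List[str]] = [None] * len(permutations)  # type: ignore[assignment]
--     arranged[idx_correct] = permutations[0]
--     distractors = permutations[1:]
--     d_idx = 0
--     for idx in range(len(arranged)):
--         if arranged[idx] is not None:
--             continue
--         arranged[idx] = distractors[d_idx]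
--         d_idx += 1
--     options = [f"{letters[idx]}) {' → '.join(seq)}" for idx, seq in enumerate(arranged)]
--     return options, letters[idx_correct]
-- ===== SOURCE B (Python) =====
-- from typing import Any, Dict, Iterable, List, Tuple
--
-- def render_options(permutations: List[List[str]], idx_correct: int) -> Tuple[List[str], str]:
--     letters = ["A", "B", "C", "D"]
--     if not permutations:
--         return [], "A"
--     pos = idx_correct % len(permutations)
--     distractors = permutations[1:]
--     arranged = distractors[:pos] + [permutations[0]] + distractors[pos:]
--     options = [f"{l}) {' → '.join(seq)}" for l, seq in zip(letters, arranged)]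
--     return options, letters[pos]
-- ===== Notes on version B (the rewrite author's own statement) =====
-- stated objective: simpler
-- what changed: B drops A's None-filled array and the skip-loop that fills gaps from distractors: it computes the correct slot as idx_correct % n and builds the arranged list directly by list slicing (distractors[:pos] + [correct] + distractors[pos:]), formatting with zip(letters, arranged) instead of indexing letters by position.
-- intended difference: For negative idx_correct with 1-3 options (fewer than 4), A places the correct answer at slot n+idx_correct but returns letters[4+idx_correct] — a letter that need not label any existing option — while B returns the letter of the slot actually holding the correct answer, which is the intended value. — e.g. on render_options([[ "x" ], [ "y" ]], -1): A returns (["A) y", "B) x"], "D"), B returns (["A) y", "B) x"], "B")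
import Mathlib
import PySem

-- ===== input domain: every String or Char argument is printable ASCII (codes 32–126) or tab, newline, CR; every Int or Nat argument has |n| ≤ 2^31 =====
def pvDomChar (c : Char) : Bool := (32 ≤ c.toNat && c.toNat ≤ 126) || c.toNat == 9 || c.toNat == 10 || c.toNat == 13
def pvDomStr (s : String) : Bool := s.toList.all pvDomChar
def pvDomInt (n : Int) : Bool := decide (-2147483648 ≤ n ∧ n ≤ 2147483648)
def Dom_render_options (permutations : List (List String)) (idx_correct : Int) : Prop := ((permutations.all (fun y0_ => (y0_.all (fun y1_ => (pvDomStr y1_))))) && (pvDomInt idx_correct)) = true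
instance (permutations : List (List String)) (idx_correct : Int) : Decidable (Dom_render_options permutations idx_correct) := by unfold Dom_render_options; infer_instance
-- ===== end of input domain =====

-- B replaces A's None-filled array and gap-filling skip-loop by direct list slicing around the
-- correct slot, and labels the correct answer by its slot; return-value equivalence outside D_.

-- ===== PORT A =====
def pvLetters : List String := ["A", "B", "C", "D"]

def render_options (permutations : List (List String)) (idx_correct : Int) : List String × String :=
  if permutations = [] then ([], "A")
  else
    let arranged0 : List (Option (List String)) :=
      PySem.List.pySetD (List.replicate permutations.length (none : Option (List String)))
        idx_correct (some (PySem.List.pyGetD permutations 0 []))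
    let distractors := PySem.List.slice permutations (some 1) none
    let st := (PySem.List.pyRange 0 permutations.length 1).foldl
      (fun (st : List (Option (List String)) × Int) idx =>
        if (PySem.List.pyGetD st.1 idx none).isSome then st
        else (PySem.List.pySetD st.1 idx (some (PySem.List.pyGetD distractors st.2 [])), st.2 + 1))
      (arranged0, 0)
    let options := (PySem.List.enumerate st.1).map
      (fun p => PySem.List.pyGetD pvLetters p.1 "" ++ ") " ++ PySem.Str.join " → " (p.2.getD []))
    (options, PySem.List.pyGetD pvLetters idx_correct "")

-- ===== PORT B =====
def render_options_alt (permutations : List (List String)) (idx_correct : Int) : List String × String :=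
  if permutations = [] then ([], "A")
  else
    let pos := (PySem.Int.mod idx_correct permutations.length).toNat
    let distractors := permutations.drop 1
    let arranged := distractors.take pos ++ [permutations.headD []] ++ distractors.drop pos
    let options := (pvLetters.zip arranged).map
      (fun p => p.1 ++ ") " ++ PySem.Str.join " → " p.2)
    (options, pvLetters.getD pos "")

-- ===== PRECONDITION & SPEC =====
-- Pre_ excludes exactly the inputs on which A raises an IndexError: more than 4 options (letters[idx]
-- out of range) or idx_correct outside [-n, n) for nonempty input.
def Pre_render_options (permutations : List (List String)) (idx_correct : Int) : Prop :=
  permutations = [] ∨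
    (permutations.length ≤ 4 ∧ -(permutations.length : Int) ≤ idx_correct ∧
      idx_correct < (permutations.length : Int))
instance (permutations : List (List String)) (idx_correct : Int) : Decidable (Pre_render_options permutations idx_correct) := by unfold Pre_render_options; infer_instance

def pvWitness_render_options : List (List String) × Int := ([[ "a", "b" ], [ "c" ]], 1)

-- For negative idx_correct with 1-3 options, A places the correct answer at slot n+idx_correct but
-- returns letters[4+idx_correct], a letter that need not label any existing option; B returns the
-- letter of the slot actually holding the correct answer, which is the intended value.
def D_render_options (permutations : List (List String)) (idx_correct : Int) : Prop :=
  permutations ≠ [] ∧ idx_correct < 0 ∧ permutations.length ≠ 4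
instance (permutations : List (List String)) (idx_correct : Int) : Decidable (D_render_options permutations idx_correct) := by unfold D_render_options; infer_instance

def Spec_render_options (permutations : List (List String)) (idx_correct : Int) (out : List String × String) : Prop := ¬ D_render_options permutations idx_correct → out = render_options_alt permutations idx_correct
instance (permutations : List (List String)) (idx_correct : Int) (out : List String × String) : Decidable (Spec_render_options permutations idx_correct out) := by unfold Spec_render_options; infer_instance

def pvDiffWitness_render_options : List (List String) × Int := ([[ "x" ], [ "y" ]], -1)
def pvDiffWitnessOut_render_options : (List String × String) × (List String × String) :=
  ((["A) y", "B) x"], "D"), (["A) y", "B) x"], "B"))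

-- ===== CLAIM (what is proved, stated in full; the proofs are below) =====
def Claim_unchanged_render_options : Prop := ∀ (permutations : List (List String)) (idx_correct : Int), Dom_render_options permutations idx_correct → Pre_render_options permutations idx_correct → Spec_render_options permutations idx_correct (render_options permutations idx_correct)
def Claim_changed_render_options : Prop := Dom_render_options (pvDiffWitness_render_options.1) (pvDiffWitness_render_options.2) ∧ Pre_render_options (pvDiffWitness_render_options.1) (pvDiffWitness_render_options.2) ∧ D_render_options (pvDiffWitness_render_options.1) (pvDiffWitness_render_options.2) ∧ render_options (pvDiffWitness_render_options.1) (pvDiffWitness_render_options.2) = pvDiffWitnessOut_render_options.1 ∧ render_options_alt (pvDiffWitness_render_options.1) (pvDiffWitness_render_options.2) = pvDiffWitnessOut_render_options.2 ∧ pvDiffWitnessOut_render_options.1 ≠ pvDiffWitnessOut_render_options.2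
def Claim_exact_render_options : Prop := ∀ (permutations : List (List String)) (idx_correct : Int), Dom_render_options permutations idx_correct → Pre_render_options permutations idx_correct → D_render_options permutations idx_correct → render_options permutations idx_correct ≠ render_options_alt permutations idx_correct

-- ===== LEMMAS AND PROOFS =====

set_option maxHeartbeats 2000000 in
theorem render_options_spec : Claim_unchanged_render_options := by
  unfold Claim_unchanged_render_options
  intro perms i _ hpre hnd
  rcases hpre with h | ⟨hlen, hlo, hhi⟩
  · subst h; rfl
  rcases perms with _ | ⟨a, perms⟩
  · rfl
  rcases perms with _ | ⟨b, perms⟩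
  · simp only [List.length_cons, List.length_nil] at hlo hhi
    have hi : i = 0 := by
      rcases lt_or_ge i 0 with h0 | h0
      · exact absurd ⟨by simp, h0, by simp⟩ hnd
      · omega
    subst hi
    simp only [render_options, render_options_alt, List.length_cons, List.length_nil,
      Nat.reduceAdd]
    rfl
  rcases perms with _ | ⟨c, perms⟩
  · simp only [List.length_cons, List.length_nil] at hlo hhi
    have h0 : 0 ≤ i := by
      by_contra h
      exact hnd ⟨by simp, by omega, by simp⟩
    interval_cases i <;>
      (simp only [render_options, render_options_alt, List.length_cons, List.length_nil,
        Nat.reduceAdd]; rfl)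
  rcases perms with _ | ⟨d, perms⟩
  · simp only [List.length_cons, List.length_nil] at hlo hhi
    have h0 : 0 ≤ i := by
      by_contra h
      exact hnd ⟨by simp, by omega, by simp⟩
    interval_cases i <;>
      (simp only [render_options, render_options_alt, List.length_cons, List.length_nil,
        Nat.reduceAdd]; rfl)
  rcases perms with _ | ⟨e, perms⟩
  · simp only [List.length_cons, List.length_nil] at hlo hhi
    interval_cases i <;>
      (simp only [render_options, render_options_alt, List.length_cons, List.length_nil,
        Nat.reduceAdd]; rfl)
  · simp only [List.length_cons] at hlen
    omega

-- ===== VERDICT (by name: the statement is the Claim_ definition above) =====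
theorem render_options_changed : Claim_changed_render_options := by unfold Claim_changed_render_options; decide
theorem render_options_tight : Claim_exact_render_options := by
  unfold Claim_exact_render_options
  intro perms i _ hpre hd heq
  rcases hd with ⟨hne, hneg, hn4⟩
  rcases hpre with h | ⟨hlen, hlo, hhi⟩
  · exact hne h
  have h2 := congrArg Prod.snd heq
  rcases perms with _ | ⟨a, perms⟩
  · exact hne rfl
  rcases perms with _ | ⟨b, perms⟩
  · simp only [List.length_cons, List.length_nil] at hlo hhi
    have : i = -1 := by omega
    subst this
    rw [show (render_options [a] (-1)).2 = "D" from rfl,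
        show (render_options_alt [a] (-1)).2 = "A" from rfl] at h2
    exact absurd h2 (by decide)
  rcases perms with _ | ⟨c, perms⟩
  · simp only [List.length_cons, List.length_nil] at hlo hhi
    have : i = -2 ∨ i = -1 := by omega
    rcases this with h | h <;> subst h
    · rw [show (render_options [a, b] (-2)).2 = "C" from rfl,
          show (render_options_alt [a, b] (-2)).2 = "A" from rfl] at h2
      exact absurd h2 (by decide)
    · rw [show (render_options [a, b] (-1)).2 = "D" from rfl,
          show (render_options_alt [a, b] (-1)).2 = "B" from rfl] at h2
      exact absurd h2 (by decide)
  rcases perms with _ | ⟨d, perms⟩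
  · simp only [List.length_cons, List.length_nil] at hlo hhi
    have : i = -3 ∨ i = -2 ∨ i = -1 := by omega
    rcases this with h | h | h <;> subst h
    · rw [show (render_options [a, b, c] (-3)).2 = "B" from rfl,
          show (render_options_alt [a, b, c] (-3)).2 = "A" from rfl] at h2
      exact absurd h2 (by decide)
    · rw [show (render_options [a, b, c] (-2)).2 = "C" from rfl,
          show (render_options_alt [a, b, c] (-2)).2 = "B" from rfl] at h2
      exact absurd h2 (by decide)
    · rw [show (render_options [a, b, c] (-1)).2 = "D" from rfl,
          show (render_options_alt [a, b, c] (-1)).2 = "C" from rfl] at h2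
      exact absurd h2 (by decide)
  · simp only [List.length_cons] at hlen hn4
    omega
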